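-- pv_equiv track=rewrite | github.com/zionia4758/programmers | level3/퍼즐 조각 채우기.py | regularization
-- ===== SOURCE A (Python) =====
-- def regularization(piece):
--     len_list=[]
--     for l in zip(*piece):
--         len_list.append([min(l),max(l)])
--
--     r_piece =[ [0]*(len_list[1][1]-len_list[1][0]+1) for i in range(len_list[0][1]-len_list[0][0]+1)]
--     for y,x in piece:
--         r_piece[y-len_list[0][0]][x-len_list[1][0]]=1
--     return r_piece
-- ===== SOURCE B (Python) =====
-- def regularization(piece):
--     ys = [y for y, _ in piece]
--     xs = [x for _, x in piece]
--     my, mx = min(ys), min(xs)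
--     h, w = max(ys) - my + 1, max(xs) - mx + 1
--     cells = {(y - my, x - mx) for y, x in piece}
--     return [[1 if (i, j) in cells else 0 for j in range(w)] for i in range(h)]
-- ===== Notes on version B (the rewrite author's own statement) =====
-- stated objective: alternative
-- what changed: A allocates a zero grid and scatters writes at shifted input coordinates; B builds a set of shifted coordinates once and fills the grid by scanning every output cell with a membership probe, a gather instead of a scatter.
import Mathlib
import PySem

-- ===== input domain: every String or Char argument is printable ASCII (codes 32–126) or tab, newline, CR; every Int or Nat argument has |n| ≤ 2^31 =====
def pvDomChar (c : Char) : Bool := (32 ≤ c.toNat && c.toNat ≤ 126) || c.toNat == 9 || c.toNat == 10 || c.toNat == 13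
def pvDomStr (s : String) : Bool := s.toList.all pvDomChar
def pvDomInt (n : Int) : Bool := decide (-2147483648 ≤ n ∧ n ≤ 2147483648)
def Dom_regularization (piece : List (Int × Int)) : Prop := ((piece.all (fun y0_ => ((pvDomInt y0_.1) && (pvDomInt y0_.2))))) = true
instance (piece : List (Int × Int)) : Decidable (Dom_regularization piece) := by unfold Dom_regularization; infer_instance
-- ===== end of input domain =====

-- B replaces A's scatter of writes into a zero grid by a set of shifted coordinates
-- probed while scanning every output cell (alternative decomposition, same cost).

-- ===== PORT A =====
-- r_piece[y-min_y][x-min_x] = 1  (row fetched, updated, stored back)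
def pvWrite (my mx : Int) (g : List (List Int)) (p : Int × Int) : List (List Int) :=
  PySem.List.pySetD g (p.1 - my)
    (PySem.List.pySetD (PySem.List.pyGetD g (p.1 - my) []) (p.2 - mx) 1)

def regularization (piece : List (Int × Int)) : List (List Int) :=
  match PySem.List.min? (piece.map (·.1)) (fun v => v),
        PySem.List.max? (piece.map (·.1)) (fun v => v),
        PySem.List.min? (piece.map (·.2)) (fun v => v),
        PySem.List.max? (piece.map (·.2)) (fun v => v) with
  | some my, some maxy, some mx, some maxx =>
    let r0 : List (List Int) :=
      (PySem.List.pyRange 0 (maxy - my + 1) 1).map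
        (fun _ => PySem.List.pyRepeat [0] (maxx - mx + 1))
    piece.foldl (pvWrite my mx) r0
  | _, _, _, _ => []   -- piece = []: the Python raises IndexError (excluded by Pre_)

-- ===== PORT B =====
def regularization_alt (piece : List (Int × Int)) : List (List Int) :=
  -- piece = []: min() raises ValueError in Python (excluded by Pre_); here each min?/max? is none
  match PySem.List.min? (piece.map (·.1)) (fun v => v) with
  | none => []
  | some my =>
  match PySem.List.min? (piece.map (·.2)) (fun v => v) with
  | none => []
  | some mx =>
  match PySem.List.max? (piece.map (·.1)) (fun v => v) with
  | none => []
  | some maxy =>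
  match PySem.List.max? (piece.map (·.2)) (fun v => v) with
  | none => []
  | some maxx =>
    let cells : PySem.Set (Int × Int) :=
      PySem.Set.ofList (piece.map (fun p => (p.1 - my, p.2 - mx)))
    (PySem.List.pyRange 0 (maxy - my + 1) 1).map (fun i =>
      (PySem.List.pyRange 0 (maxx - mx + 1) 1).map (fun j =>
        if PySem.Set.contains cells (i, j) then (1 : Int) else 0))

-- ===== PRECONDITION & SPEC =====
-- Pre_ excludes only the empty list, on which the Python A raises IndexError.
def Pre_regularization (piece : List (Int × Int)) : Prop := piece ≠ []
instance (piece : List (Int × Int)) : Decidable (Pre_regularization piece) := by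
  unfold Pre_regularization; infer_instance
def pvWitness_regularization : (List (Int × Int)) := [((0 : Int), (1 : Int)), (1, 0)]

def Spec_regularization (piece : List (Int × Int)) (out : List (List Int)) : Prop := out = regularization_alt piece
instance (piece : List (Int × Int)) (out : List (List Int)) : Decidable (Spec_regularization piece out) := by unfold Spec_regularization; infer_instance

-- ===== CLAIM (what is proved, stated in full; the proofs are below) =====
def Claim_equal_regularization : Prop := ∀ (piece : List (Int × Int)), Dom_regularization piece → Pre_regularization piece → Spec_regularization piece (regularization piece)

-- ===== LEMMAS AND PROOFS =====

theorem pvWrite_length (my mx : Int) (g : List (List Int)) (p : Int × Int) :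
    (pvWrite my mx g p).length = g.length := by
  simp [pvWrite, PySem.List.length_pySetD]

theorem pvFold_length (my mx : Int) (l : List (Int × Int)) (g : List (List Int)) :
    (l.foldl (pvWrite my mx) g).length = g.length := by
  induction l generalizing g with
  | nil => rfl
  | cons p t ih => simp [List.foldl_cons, ih, pvWrite_length]

theorem pvWrite_eq_set (my mx : Int) (g : List (List Int)) (p : Int × Int)
    (h1 : 0 ≤ p.1 - my) (h2 : p.1 - my < (g.length : Int)) (h3 : 0 ≤ p.2 - mx) :
    pvWrite my mx g p =
      g.set (p.1 - my).toNat
        ((g.getD (p.1 - my).toNat []).set (p.2 - mx).toNat 1) := by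
  rw [pvWrite, PySem.List.pySetD_of_nonneg _ _ h1, PySem.List.pySetD_of_nonneg _ _ h3,
      PySem.List.pyGetD_eq_getElem _ _ h1 (by simpa using h2),
      List.getD_eq_getElem g [] (by omega)]

theorem pvWrite_rows (my mx : Int) (g : List (List Int)) (p : Int × Int) (w : Nat)
    (hw : ∀ r ∈ g, r.length = w)
    (h1 : 0 ≤ p.1 - my) (h2 : p.1 - my < (g.length : Int)) (h3 : 0 ≤ p.2 - mx) :
    ∀ r ∈ pvWrite my mx g p, r.length = w := by
  intro r hr
  rw [pvWrite_eq_set my mx g p h1 h2 h3] at hr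
  rcases List.mem_or_eq_of_mem_set hr with h | h
  · exact hw r h
  · subst h
    rw [List.length_set]
    rw [List.getD_eq_getElem g [] (by omega)]
    exact hw _ (List.getElem_mem _)

theorem pvWrite_get (my mx : Int) (g : List (List Int)) (p : Int × Int) (w i j : Nat)
    (hw : ∀ r ∈ g, r.length = w)
    (hr : 0 ≤ p.1 - my) (hr2 : p.1 - my < (g.length : Int))
    (hc : 0 ≤ p.2 - mx) (_hc2 : p.2 - mx < (w : Int))
    (hi : i < g.length) (hj : j < w) :
    ((pvWrite my mx g p).getD i []).getD j 0 =
      if p.1 - my = (i : Int) ∧ p.2 - mx = (j : Int) then 1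
      else (g.getD i []).getD j 0 := by
  rw [pvWrite_eq_set my mx g p hr hr2 hc]
  rw [List.getD_eq_getElem _ [] (by simpa using hi),
      List.getD_eq_getElem g [] hi, List.getElem_set]
  by_cases hrow : (p.1 - my).toNat = i
  · rw [if_pos hrow, hrow, List.getD_eq_getElem g [] hi]
    have hlen : (g[i].set (p.2 - mx).toNat 1).length = g[i].length := List.length_set ..
    have hwi : g[i].length = w := hw _ (List.getElem_mem hi)
    rw [List.getD_eq_getElem _ 0 (by omega), List.getD_eq_getElem _ 0 (by omega),
        List.getElem_set]
    by_cases hcol : (p.2 - mx).toNat = j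
    · rw [if_pos hcol, if_pos ⟨by omega, by omega⟩]
    · rw [if_neg hcol, if_neg (by rintro ⟨h1, h2⟩; omega)]
  · rw [if_neg hrow, if_neg (by rintro ⟨h1, h2⟩; omega)]

theorem pvFold_rows (my mx W : Int) (l : List (Int × Int)) (g : List (List Int))
    (hl : ∀ p ∈ l, 0 ≤ p.1 - my ∧ p.1 - my < (g.length : Int) ∧ 0 ≤ p.2 - mx ∧ p.2 - mx < W)
    (hw : ∀ r ∈ g, r.length = W.toNat) :
    ∀ r ∈ l.foldl (pvWrite my mx) g, r.length = W.toNat := by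
  induction l generalizing g with
  | nil => exact hw
  | cons p t ih =>
    have hp := hl p (by simp)
    refine ih _ (fun q hq => ?_) (pvWrite_rows my mx g p W.toNat hw hp.1 hp.2.1 hp.2.2.1)
    have := hl q (by simp [hq])
    rw [pvWrite_length]
    exact this

theorem pvFold_get (my mx W : Int) (l : List (Int × Int)) (g : List (List Int)) (i j : Nat)
    (hl : ∀ p ∈ l, 0 ≤ p.1 - my ∧ p.1 - my < (g.length : Int) ∧ 0 ≤ p.2 - mx ∧ p.2 - mx < W)
    (hw : ∀ r ∈ g, r.length = W.toNat)
    (hi : i < g.length) (hj : j < W.toNat) :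
    ((l.foldl (pvWrite my mx) g).getD i []).getD j 0 =
      if ∃ p ∈ l, p.1 - my = (i : Int) ∧ p.2 - mx = (j : Int) then 1
      else (g.getD i []).getD j 0 := by
  induction l generalizing g with
  | nil => simp
  | cons p t ih =>
    have hp := hl p (by simp)
    have hW0 : (0:Int) ≤ W := le_trans hp.2.2.1 (le_of_lt hp.2.2.2)
    have hw' := pvWrite_rows my mx g p W.toNat hw hp.1 hp.2.1 hp.2.2.1
    rw [List.foldl_cons,
        ih (pvWrite my mx g p)
          (fun q hq => by have := hl q (by simp [hq]); rw [pvWrite_length]; exact this)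
          hw' (by rw [pvWrite_length]; exact hi)]
    by_cases hex : ∃ q ∈ t, q.1 - my = (i : Int) ∧ q.2 - mx = (j : Int)
    · rw [if_pos hex, if_pos (by obtain ⟨q, hq, h⟩ := hex; exact ⟨q, by simp [hq], h⟩)]
    · rw [if_neg hex,
          pvWrite_get my mx g p W.toNat i j hw hp.1 hp.2.1 hp.2.2.1 (by omega) hi hj]
      by_cases hph : p.1 - my = (i : Int) ∧ p.2 - mx = (j : Int)
      · rw [if_pos hph, if_pos ⟨p, by simp, hph⟩]
      · rw [if_neg hph, if_neg ?_]
        rintro ⟨q, hq, h⟩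
        rcases List.mem_cons.1 hq with rfl | hq'
        · exact hph h
        · exact hex ⟨q, hq', h⟩

theorem regularization_spec' (piece : List (Int × Int)) (hpre : piece ≠ []) :
    regularization piece = regularization_alt piece := by
  rw [regularization, regularization_alt]
  cases hmy : PySem.List.min? (piece.map (·.1)) (fun v => v) with
  | none => exact absurd (by simpa using (PySem.List.min?_eq_none_iff _ _).1 hmy) hpre
  | some my =>
  cases hMy : PySem.List.max? (piece.map (·.1)) (fun v => v) with
  | none => exact absurd (by simpa using (PySem.List.max?_eq_none_iff _ _).1 hMy) hpre
  | some maxy =>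
  cases hmx : PySem.List.min? (piece.map (·.2)) (fun v => v) with
  | none => exact absurd (by simpa using (PySem.List.min?_eq_none_iff _ _).1 hmx) hpre
  | some mx =>
  cases hMx : PySem.List.max? (piece.map (·.2)) (fun v => v) with
  | none => exact absurd (by simpa using (PySem.List.max?_eq_none_iff _ _).1 hMx) hpre
  | some maxx =>
  simp only []
  -- bounds for every point of the piece
  have hb : ∀ p ∈ piece, my ≤ p.1 ∧ p.1 ≤ maxy ∧ mx ≤ p.2 ∧ p.2 ≤ maxx := by
    intro p hp
    exact ⟨PySem.List.min?_isMin hmy _ (List.mem_map_of_mem hp),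
           PySem.List.max?_isMax hMy _ (List.mem_map_of_mem hp),
           PySem.List.min?_isMin hmx _ (List.mem_map_of_mem hp),
           PySem.List.max?_isMax hMx _ (List.mem_map_of_mem hp)⟩
  obtain ⟨q, hq⟩ : ∃ q, q ∈ piece := by
    cases piece with
    | nil => exact absurd rfl hpre
    | cons a t => exact ⟨a, by simp⟩
  have hH : (0:Int) < maxy - my + 1 := by have := hb q hq; omega
  have hW : (0:Int) < maxx - mx + 1 := by have := hb q hq; omega
  set H : Int := maxy - my + 1 with hHdef
  set W : Int := maxx - mx + 1 with hWdef
  set r0 : List (List Int) :=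
    (PySem.List.pyRange 0 H 1).map (fun _ => PySem.List.pyRepeat [0] W) with hr0
  have hr0len : r0.length = H.toNat := by
    simp [hr0, PySem.List.length_pyRange_one]
  have hr0rows : ∀ r ∈ r0, r.length = W.toNat := by
    intro r hr
    obtain ⟨a, _, rfl⟩ := List.mem_map.1 hr
    simp [PySem.List.pyRepeat_singleton]
  have hl : ∀ p ∈ piece, 0 ≤ p.1 - my ∧ p.1 - my < (r0.length : Int) ∧
      0 ≤ p.2 - mx ∧ p.2 - mx < W := by
    intro p hp
    have := hb p hp
    rw [hr0len]
    constructor; · omega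
    constructor; · omega
    constructor; · omega
    omega
  apply List.ext_getElem
  · rw [pvFold_length, hr0len, List.length_map, PySem.List.length_pyRange_one]
    omega
  intro i hi1 hi2
  have hi : i < H.toNat := by rwa [pvFold_length, hr0len] at hi1
  have hrowlen : ((piece.foldl (pvWrite my mx) r0)[i]).length = W.toNat :=
    pvFold_rows my mx W piece r0 hl hr0rows _ (List.getElem_mem _)
  apply List.ext_getElem
  · rw [hrowlen]
    simp [PySem.List.getElem_pyRange_one, PySem.List.length_pyRange_one]
  intro j hj1 hj2
  have hj : j < W.toNat := by rwa [hrowlen] at hj1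
  -- left side via the fold characterisation
  have hL : ((piece.foldl (pvWrite my mx) r0)[i])[j] =
      if ∃ p ∈ piece, p.1 - my = (i : Int) ∧ p.2 - mx = (j : Int) then 1 else 0 := by
    rw [← List.getD_eq_getElem _ 0 hj1, ← List.getD_eq_getElem _ [] hi1,
        pvFold_get my mx W piece r0 i j hl hr0rows (by rwa [hr0len]) hj]
    have hbase : (r0.getD i []).getD j 0 = 0 := by
      rw [List.getD_eq_getElem r0 [] (by omega)]
      have : r0[i] = PySem.List.pyRepeat [0] W := by
        simp [hr0]
      rw [this, PySem.List.pyRepeat_singleton, List.getD_replicate _ hj]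
    rw [hbase]
  rw [hL]
  -- right side: grid scan probing the set
  simp only [List.getElem_map, PySem.List.getElem_pyRange_one, zero_add,
             PySem.Set.contains_iff, PySem.Set.mem_ofList]
  by_cases hmem : ∃ p ∈ piece, p.1 - my = (i : Int) ∧ p.2 - mx = (j : Int)
  · rw [if_pos hmem, if_pos ?_]
    obtain ⟨p, hp, h1, h2⟩ := hmem
    exact List.mem_map.2 ⟨p, hp, by simp [h1, h2]⟩
  · rw [if_neg hmem, if_neg ?_]
    intro h
    obtain ⟨p, hp, hpe⟩ := List.mem_map.1 h
    exact hmem ⟨p, hp, by simpa using ⟨congrArg Prod.fst hpe, congrArg Prod.snd hpe⟩⟩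

-- ===== VERDICT (by name: the statement is the Claim_ definition above) =====
theorem regularization_spec : Claim_equal_regularization := by
  intro piece _ hpre
  exact (regularization_spec' piece hpre).symm ▸ rfl
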